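-- pv_equiv track=rewrite | github.com/PhSe-coder/MMT-ABSA | dataset.py | transform
-- ===== SOURCE A (Python) =====
-- from typing import List, Dict, Union
--
-- def transform(
--     text: str,
--     text_labels: str,
--     wordpiece_tokens: List[str],
--     special_tokens: List[str],
-- ):
--     text_tokens, text_labels = text.split(), text_labels.split()
--     assert len(text_tokens) == len(text_labels)
--     token_tuples = list(zip(text_tokens, text_labels))
--     i, offset = 0, 0
--     labels: List[str] = []
--     for token in wordpiece_tokens:
--         if token in special_tokens:
--             tag = "SPECIAL_TOKEN"
--         else:
--             tt = token_tuples[i]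
--             if token.startswith("##"):
--                 tag = f"I{labels[-1][1:]}" if labels[-1] not in ["O", "SPECIAL_TOKEN"] else "O"
--             else:
--                 tag = tt[1]
--                 if tag != "O":
--                     tag = f"B{tag[1:]}" if labels[-1] in ["O", "SPECIAL_TOKEN"] else f"I{tag[1:]}"
--             offset += len(token.replace("##", ""))
--             if offset == len(tt[0]):
--                 i += 1
--                 offset = 0
--         labels.append(tag)
--     return labels
-- ===== SOURCE B (Python) =====
-- from typing import List
--
--
-- def transform(
--     text: str,
--     text_labels: str,
--     wordpiece_tokens: List[str],
--     special_tokens: List[str],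
-- ):
--     words = text.split()
--     labs = text_labels.split()
--     assert len(words) == len(labs)
--     # pass 1: boundary detection — annotate each wordpiece with None (special)
--     # or (label of its word, is_continuation)
--     annotated = []
--     i, offset = 0, 0
--     for token in wordpiece_tokens:
--         if token in special_tokens:
--             annotated.append(None)
--         else:
--             annotated.append((labs[i], token.startswith("##")))
--             offset += len(token.replace("##", ""))
--             if offset == len(words[i]):
--                 i += 1
--                 offset = 0
--     # pass 2: BIO labeling, keeping only the previously emitted tag
--     out = []
--     prev = "SPECIAL_TOKEN"
--     for ann in annotated:
--         if ann is None:
--             tag = "SPECIAL_TOKEN"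
--         else:
--             lab, cont = ann
--             if cont:
--                 tag = "I" + prev[1:] if prev not in ("O", "SPECIAL_TOKEN") else "O"
--             elif lab != "O":
--                 tag = ("B" if prev in ("O", "SPECIAL_TOKEN") else "I") + lab[1:]
--             else:
--                 tag = lab
--         out.append(tag)
--         prev = tag
--     return out
-- ===== Notes on version B (the rewrite author's own statement) =====
-- stated objective: alternative
-- what changed: A's single loop that re-reads labels[-1] while mixing boundary arithmetic and tagging is split into two differently-shaped passes: a boundary-detection pass annotating each wordpiece with (word label, is-continuation) or a special marker, then a BIO-labeling pass over the annotations that keeps only the previously emitted tag.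
import Mathlib
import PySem

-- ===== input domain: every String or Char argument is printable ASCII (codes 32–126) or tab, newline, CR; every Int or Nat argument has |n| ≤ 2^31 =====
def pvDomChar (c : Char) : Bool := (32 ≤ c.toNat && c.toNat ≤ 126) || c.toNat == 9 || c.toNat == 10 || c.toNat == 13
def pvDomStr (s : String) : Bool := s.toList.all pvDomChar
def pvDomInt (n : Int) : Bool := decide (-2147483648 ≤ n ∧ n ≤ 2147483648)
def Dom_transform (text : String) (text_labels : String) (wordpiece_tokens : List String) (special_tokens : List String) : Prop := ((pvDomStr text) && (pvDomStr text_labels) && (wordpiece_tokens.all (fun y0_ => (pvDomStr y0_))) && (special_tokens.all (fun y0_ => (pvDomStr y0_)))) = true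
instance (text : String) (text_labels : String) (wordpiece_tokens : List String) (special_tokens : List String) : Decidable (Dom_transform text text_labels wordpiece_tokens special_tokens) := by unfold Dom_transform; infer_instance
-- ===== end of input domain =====

-- B replaces A's single loop (which re-reads labels[-1]) by two differently-shaped passes:
-- a boundary-detection pass producing annotations, then a BIO-labeling pass over them keeping
-- only the previous tag; objective: alternative decomposition, equal cost.

-- token.replace("##", "")  (shared Python expression of both programs)
def pvStrip (t : String) : String := PySem.Str.replace t "##" ""
-- s[1:]  (shared Python expression of both programs)
def pyTail (s : String) : String := PySem.Str.slice s (some 1) none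

-- ===== PORT A =====
-- the for-loop of A; state (i, offset, labels); none = Python raises (IndexError)
def transformGo (tuples : List (String × String)) (special : List String) :
    List String → Nat → Int → List String → Option (List String)
  | [], _, _, labels => some labels
  | token :: rest, i, off, labels =>
    if special.contains token then
      transformGo tuples special rest i off (labels ++ ["SPECIAL_TOKEN"])
    else
      match PySem.List.pyGet? tuples (i : Int) with
      | none => none
      | some tt =>
        let tag? : Option String :=
          if PySem.Str.startswith token "##" then
            match PySem.List.pyGet? labels (-1) with
            | none => none
            | some last =>
              some (if ¬(last = "O" ∨ last = "SPECIAL_TOKEN") then "I" ++ pyTail last else "O")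
          else
            if tt.2 ≠ "O" then
              match PySem.List.pyGet? labels (-1) with
              | none => none
              | some last =>
                some (if last = "O" ∨ last = "SPECIAL_TOKEN" then "B" ++ pyTail tt.2
                      else "I" ++ pyTail tt.2)
            else some tt.2
        match tag? with
        | none => none
        | some tag =>
          let off' := off + PySem.Str.len (pvStrip token)
          if off' = PySem.Str.len tt.1 then
            transformGo tuples special rest (i + 1) 0 (labels ++ [tag])
          else
            transformGo tuples special rest i off' (labels ++ [tag])

def transform (text : String) (text_labels : String) (wordpiece_tokens : List String) (special_tokens : List String) : List String :=
  let text_tokens := PySem.Str.split₀ text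
  let labs := PySem.Str.split₀ text_labels
  -- Python asserts len equal and raises IndexError inside the loop: those inputs are outside
  -- Pre_transform; the port returns [] / .getD [] there.
  if text_tokens.length = labs.length then
    (transformGo (text_tokens.zip labs) special_tokens wordpiece_tokens 0 0 []).getD []
  else []

-- ===== PORT B =====
-- pass 1 of Source B: boundary detection; none = special token, some (label, is_continuation)
def altAnnotate (words labs special : List String) :
    List String → Nat → Int → List (Option (String × Bool))
  | [], _, _ => []
  | token :: rest, i, off =>
    if special.contains token then none :: altAnnotate words labs special rest i off
    else
      let ann := some (labs.getD i "", PySem.Str.startswith token "##")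
      let off' := off + PySem.Str.len (pvStrip token)
      if off' = PySem.Str.len (words.getD i "") then
        ann :: altAnnotate words labs special rest (i + 1) 0
      else
        ann :: altAnnotate words labs special rest i off'

-- pass 2 of Source B: BIO labeling from the previous emitted tag
def altLabel : List (Option (String × Bool)) → String → List String
  | [], _ => []
  | none :: rest, _ => "SPECIAL_TOKEN" :: altLabel rest "SPECIAL_TOKEN"
  | some (lab, cont) :: rest, prev =>
    let tag :=
      if cont then (if ¬(prev = "O" ∨ prev = "SPECIAL_TOKEN") then "I" ++ pyTail prev else "O")
      else if lab ≠ "O" then (if prev = "O" ∨ prev = "SPECIAL_TOKEN" then "B" else "I") ++ pyTail lab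
      else lab
    tag :: altLabel rest tag

def transform_alt (text : String) (text_labels : String) (wordpiece_tokens : List String) (special_tokens : List String) : List String :=
  let words := PySem.Str.split₀ text
  let labs := PySem.Str.split₀ text_labels
  if words.length = labs.length then
    altLabel (altAnnotate words labs special_tokens wordpiece_tokens 0 0) "SPECIAL_TOKEN"
  else []

-- ===== PRECONDITION & SPEC =====
-- Pre_ excludes exactly the inputs on which A raises: AssertionError when the two splits have
-- different lengths; IndexError when a non-special wordpiece falls outside the words (the
-- alignment shape below); IndexError reading labels[-1] when the very first wordpiece is
-- non-special and needs the previous label (it is a "##"-continuation or its word's label is not "O").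

-- alignment shape of the input: every non-special wordpiece falls inside an existing word,
-- where a word ends when the cumulative stripped piece length reaches its length
-- (i = index of the current word, off = characters of it already covered); no tags are computed
def piecesFitWords (words special : List String) : List String → Nat → Int → Bool
  | [], _, _ => true
  | token :: rest, i, off =>
    if special.contains token then piecesFitWords words special rest i off
    else
      decide (i < words.length) &&
      (let off' := off + PySem.Str.len (pvStrip token)
       if off' = PySem.Str.len (words.getD i "") then piecesFitWords words special rest (i + 1) 0
       else piecesFitWords words special rest i off')

-- the very first wordpiece (if any) must be special, or word-initial with label "O": otherwise A
-- reads labels[-1] from the empty list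
def headTokenOK (labs special : List String) : List String → Bool
  | [] => true
  | t :: _ => special.contains t || (!PySem.Str.startswith t "##" && labs.getD 0 "" == "O")

def Pre_transform (text : String) (text_labels : String) (wordpiece_tokens : List String) (special_tokens : List String) : Prop :=
  (PySem.Str.split₀ text).length = (PySem.Str.split₀ text_labels).length ∧
  headTokenOK (PySem.Str.split₀ text_labels) special_tokens wordpiece_tokens = true ∧
  piecesFitWords (PySem.Str.split₀ text) special_tokens wordpiece_tokens 0 0 = true

instance (text : String) (text_labels : String) (wordpiece_tokens : List String) (special_tokens : List String) : Decidable (Pre_transform text text_labels wordpiece_tokens special_tokens) := by unfold Pre_transform; infer_instance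

def pvWitness_transform : String × String × List String × List String :=
  ("john smith", "B-PER I-PER", ["[CLS]", "john", "sm", "##ith", "[SEP]"], ["[CLS]", "[SEP]"])

def Spec_transform (text : String) (text_labels : String) (wordpiece_tokens : List String) (special_tokens : List String) (out : List String) : Prop := out = transform_alt text text_labels wordpiece_tokens special_tokens
instance (text : String) (text_labels : String) (wordpiece_tokens : List String) (special_tokens : List String) (out : List String) : Decidable (Spec_transform text text_labels wordpiece_tokens special_tokens out) := by unfold Spec_transform; infer_instance

-- ===== CLAIM (what is proved, stated in full; the proofs are below) =====
def Claim_equal_transform : Prop := ∀ (text : String) (text_labels : String) (wordpiece_tokens : List String) (special_tokens : List String), Dom_transform text text_labels wordpiece_tokens special_tokens → Pre_transform text text_labels wordpiece_tokens special_tokens → Spec_transform text text_labels wordpiece_tokens special_tokens (transform text text_labels wordpiece_tokens special_tokens)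

-- ===== LEMMAS AND PROOFS =====

-- the BIO tag both programs compute for a non-special wordpiece, given the previous tag
def bioTag (tok lab prev : String) : String :=
  if PySem.Str.startswith tok "##" then
    (if ¬(prev = "O" ∨ prev = "SPECIAL_TOKEN") then "I" ++ pyTail prev else "O")
  else if lab ≠ "O" then (if prev = "O" ∨ prev = "SPECIAL_TOKEN" then "B" else "I") ++ pyTail lab
  else lab

theorem tag_match (tok lab prev : String) :
    (if PySem.Str.startswith tok "##" then
       some (if ¬(prev = "O" ∨ prev = "SPECIAL_TOKEN") then "I" ++ pyTail prev else "O")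
     else if lab ≠ "O" then
       some (if prev = "O" ∨ prev = "SPECIAL_TOKEN" then "B" ++ pyTail lab else "I" ++ pyTail lab)
     else some lab) = some (bioTag tok lab prev) := by
  unfold bioTag
  split_ifs <;> rfl

theorem altLabel_cons (tok lab : String) (rest : List (Option (String × Bool))) (prev : String) :
    altLabel (some (lab, PySem.Str.startswith tok "##") :: rest) prev =
      bioTag tok lab prev :: altLabel rest (bioTag tok lab prev) := by
  simp only [altLabel, bioTag]

theorem go_eq (words labs special : List String) (hlen : words.length = labs.length) :
    ∀ (ts : List String) (i : Nat) (off : Int) (labels : List String),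
      piecesFitWords words special ts i off = true →
      (labels.isEmpty = true →
        match ts with
        | [] => True
        | t :: _ => special.contains t = true ∨
            (PySem.Str.startswith t "##" = false ∧ labs.getD i "" = "O")) →
      transformGo (words.zip labs) special ts i off labels =
        some (labels ++ altLabel (altAnnotate words labs special ts i off)
                        (labels.getLastD "SPECIAL_TOKEN")) := by
  intro ts
  induction ts with
  | nil => intro i off labels _ _; simp [transformGo, altAnnotate, altLabel]
  | cons token rest ih =>
    intro i off labels hfit hhead
    by_cases hs : special.contains token
    · simp only [piecesFitWords, if_pos hs] at hfit
      simp only [transformGo, altAnnotate, altLabel, if_pos hs]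
      rw [ih i off (labels ++ ["SPECIAL_TOKEN"]) hfit (by intro h; simp at h)]
      simp
    · simp only [piecesFitWords, if_neg hs, Bool.and_eq_true, decide_eq_true_eq] at hfit
      obtain ⟨hi, hrest⟩ := hfit
      have hi' : i < labs.length := hlen ▸ hi
      have hzip : PySem.List.pyGet? (words.zip labs) (i : Int) = some (words[i], labs[i]) := by
        rw [PySem.List.pyGet?_natCast, List.getElem?_eq_getElem (by simp; omega)]
        simp [List.getElem_zip]
      have hw : words.getD i "" = words[i] := List.getD_eq_getElem _ _ hi
      have hl : labs.getD i "" = labs[i] := List.getD_eq_getElem _ _ hi'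
      simp only [transformGo, altAnnotate, if_neg hs, hzip, hw, hl]
      match labels, hhead with
      | [], hhead =>
        obtain ⟨hns, hO⟩ := (hhead rfl).resolve_left hs
        rw [hl] at hO
        simp only [hns, hO, Bool.false_eq_true, ite_not, ne_eq, not_true_eq_false, reduceIte]
        by_cases hoff : off + PySem.Str.len (pvStrip token) = PySem.Str.len words[i]
        · simp only [if_pos hoff, hw, List.nil_append] at hrest ⊢
          rw [ih (i + 1) 0 ["O"] hrest (by intro h; simp at h)]
          simp [altLabel]
        · simp only [if_neg hoff, hw, List.nil_append] at hrest ⊢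
          rw [ih i (off + PySem.Str.len (pvStrip token)) ["O"] hrest (by intro h; simp at h)]
          simp [altLabel]
      | l :: ls, _ =>
        have hprev : PySem.List.pyGet? (l :: ls) (-1) =
            some ((l :: ls).getLastD "SPECIAL_TOKEN") := by
          rw [PySem.List.pyGet?_neg_one]
          simp [List.getLastD_eq_getLast?, List.getLast?_eq_some_getLast (l := l :: ls) (by simp)]
        rw [hw] at hrest
        simp only [hprev, tag_match]
        by_cases hoff : off + PySem.Str.len (pvStrip token) = PySem.Str.len words[i]
        · simp only [if_pos hoff] at hrest ⊢
          rw [ih (i + 1) 0 ((l :: ls) ++ [bioTag token labs[i] ((l :: ls).getLastD "SPECIAL_TOKEN")])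
            hrest (by intro h; simp at h)]
          rw [altLabel_cons, List.getLastD_concat]
          simp
        · simp only [if_neg hoff] at hrest ⊢
          rw [ih i (off + PySem.Str.len (pvStrip token)) ((l :: ls) ++ [bioTag token labs[i] ((l :: ls).getLastD "SPECIAL_TOKEN")])
            hrest (by intro h; simp at h)]
          rw [altLabel_cons, List.getLastD_concat]
          simp

theorem witness_ok : Dom_transform pvWitness_transform.1 pvWitness_transform.2.1
    pvWitness_transform.2.2.1 pvWitness_transform.2.2.2 ∧
    Pre_transform pvWitness_transform.1 pvWitness_transform.2.1
    pvWitness_transform.2.2.1 pvWitness_transform.2.2.2 := by decide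

-- ===== VERDICT (by name: the statement is the Claim_ definition above) =====
theorem transform_spec : Claim_equal_transform := by
  intro text text_labels wp sp _ hpre
  obtain ⟨hlen, hhead, hfit⟩ := hpre
  unfold Spec_transform transform transform_alt
  simp only [hlen, if_pos]
  rw [go_eq _ _ _ hlen wp 0 0 [] hfit ?_]
  · simp
  · intro _
    cases wp with
    | nil => trivial
    | cons t r =>
      simp only [headTokenOK, Bool.or_eq_true, Bool.and_eq_true, Bool.not_eq_true',
        beq_iff_eq] at hhead
      exact hhead
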